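-- pv_equiv track=rewrite | github.com/juy4556/PythonAlgorithm | 잡동/ne/5.py | make_flag
-- ===== SOURCE A (Python) =====
-- def make_flag(length, samples):
--     flag = [[-1 for _ in range(length)] for _ in range(length)]
--     for i in range(length):
--         temp = -1
--         for j in range(length - 1, -1, -1):
--             if samples[i][j] == 1:
--                 if temp == -1:
--                     temp = j
--                 flag[i][j] = temp
--             else:
--                 temp = -1
--     return flag
-- ===== SOURCE B (Python) =====
-- def make_flag(length, samples):
--     flag = []
--     for i in range(length):
--         row = [-1] * length
--         j = 0
--         while j < length:
--             if samples[i][j] == 1: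
--                 k = j
--                 while k + 1 < length and samples[i][k + 1] == 1:
--                     k += 1
--                 for t in range(j, k + 1):
--                     row[t] = k
--                 j = k + 1
--             else:
--                 j += 1
--         flag.append(row)
--     return flag
-- ===== Notes on version B (the rewrite author's own statement) =====
-- stated objective: alternative
-- what changed: Replaces A's backward per-row sweep that carries the rightmost-1 index in a temp variable with a forward two-phase pass that locates each consecutive run of 1s, finds its end index first, then fills the whole run, skipping past it.
import Mathlib
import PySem

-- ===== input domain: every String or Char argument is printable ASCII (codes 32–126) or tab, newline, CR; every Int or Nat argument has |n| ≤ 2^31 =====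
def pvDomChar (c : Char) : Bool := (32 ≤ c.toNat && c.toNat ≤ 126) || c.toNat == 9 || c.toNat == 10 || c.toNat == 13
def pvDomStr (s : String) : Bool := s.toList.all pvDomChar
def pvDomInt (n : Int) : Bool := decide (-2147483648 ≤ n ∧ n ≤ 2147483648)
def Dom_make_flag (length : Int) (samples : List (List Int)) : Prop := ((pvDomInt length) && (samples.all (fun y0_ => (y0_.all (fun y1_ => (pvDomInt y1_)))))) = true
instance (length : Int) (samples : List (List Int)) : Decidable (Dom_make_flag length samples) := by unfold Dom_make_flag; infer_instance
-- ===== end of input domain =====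

-- B replaces A's backward sweep (carrying the rightmost-1 index in `temp`) by a forward
-- two-phase pass that finds each run of 1s, locates its end first, then fills the run;
-- same return value, objective: alternative decomposition (no speed claim).

-- ===== PORT A =====
-- shared elementary indexing helpers: Python xs[i]; under Pre_ every index hit is in
-- range, so the `.getD` defaults are never taken.
def pvRow (xs : List (List Int)) (i : Int) : List Int := (PySem.List.pyGet? xs i).getD []
def pvG (s : List Int) (j : Int) : Int := (PySem.List.pyGet? s j).getD 0

-- literal port of A: flag = length×length matrix of -1; for i in range(length):
-- temp = -1; for j in range(length-1,-1,-1): if samples[i][j]==1 then (if temp==-1: temp=j);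
-- flag[i][j]=temp else temp=-1
def make_flag (length : Int) (samples : List (List Int)) : List (List Int) :=
  let flag := (PySem.List.pyRange 0 length 1).map
    (fun _ => (PySem.List.pyRange 0 length 1).map (fun _ => (-1 : Int)))
  (PySem.List.pyRange 0 length 1).foldl (fun flag i =>
    ((PySem.List.pyRange (length - 1) (-1) (-1)).foldl
      (fun (st : List (List Int) × Int) j =>
        if pvG (pvRow samples i) j = 1 then
          let temp := if st.2 = -1 then j else st.2
          -- flag[i][j] = temp
          (st.1.set i.toNat ((pvRow st.1 i).set j.toNat temp), temp)
        else (st.1, -1))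
      (flag, -1)).1) flag

-- ===== PORT B =====
-- while k+1 < length and samples[i][k+1] == 1: k += 1
def pvRunEnd (s : List Int) (n k : Nat) : Nat :=
  if h : k + 1 < n ∧ pvG s ((k : Int) + 1) = 1 then pvRunEnd s n (k + 1) else k
termination_by n - k
decreasing_by omega

-- for t in range(j, k+1): row[t] = k
def pvFillRange (row : List Int) (j k : Nat) : List Int :=
  (List.range' j (k + 1 - j)).foldl (fun r t => r.set t (k : Int)) row

-- termination fact for the outer while loop of B (cited in decreasing_by)
theorem pvRunEnd_ge (s : List Int) (n k : Nat) : k ≤ pvRunEnd s n k := by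
  induction k using pvRunEnd.induct s n with
  | case1 k h ih => rw [pvRunEnd, dif_pos h]; omega
  | case2 k h => rw [pvRunEnd, dif_neg h]

-- while j < length: if samples[i][j]==1 then find run end k, fill row[j..k] with k, j = k+1
-- else j += 1
def pvFillRow (s : List Int) (n : Nat) (row : List Int) (j : Nat) : List Int :=
  if h : j < n then
    if pvG s (j : Int) = 1 then
      let k := pvRunEnd s n j
      pvFillRow s n (pvFillRange row j k) (k + 1)
    else pvFillRow s n row (j + 1)
  else row
termination_by n - j
decreasing_by
  · have := pvRunEnd_ge s n j; omega
  · omega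

def make_flag_alt (length : Int) (samples : List (List Int)) : List (List Int) :=
  let n := length.toNat
  (List.range n).foldl (fun (flag : List (List Int)) (i : Nat) =>
    flag ++ [pvFillRow (pvRow samples (i : Int)) n (List.replicate n (-1)) 0]) []

-- ===== PRECONDITION & SPEC =====
-- Pre_ excludes exactly the inputs where Python A raises IndexError: samples must have at
-- least `length` rows and each of the first `length` rows at least `length` entries.
def Pre_make_flag (length : Int) (samples : List (List Int)) : Prop :=
  length.toNat ≤ samples.length ∧
    ∀ r ∈ samples.take length.toNat, length.toNat ≤ r.length
instance (length : Int) (samples : List (List Int)) : Decidable (Pre_make_flag length samples) := by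
  unfold Pre_make_flag; infer_instance

def pvWitness_make_flag : Int × List (List Int) := (3, [[1, 0, 1], [1, 1, 1], [0, 1, 1]])

def Spec_make_flag (length : Int) (samples : List (List Int)) (out : List (List Int)) : Prop :=
  out = make_flag_alt length samples
instance (length : Int) (samples : List (List Int)) (out : List (List Int)) :
    Decidable (Spec_make_flag length samples out) := by unfold Spec_make_flag; infer_instance

-- ===== CLAIM (what is proved, stated in full; the proofs are below) =====
def Claim_equal_make_flag : Prop := ∀ (length : Int) (samples : List (List Int)),
  Dom_make_flag length samples → Pre_make_flag length samples →
    Spec_make_flag length samples (make_flag length samples)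

-- ===== LEMMAS AND PROOFS =====

-- the common canonical row value both programs compute
def pvSpecRow (s : List Int) (n : Nat) : List Int :=
  (List.range n).map (fun (t : Nat) => if pvG s (t : Int) = 1 then ((pvRunEnd s n t : Nat) : Int) else -1)

theorem pvRunEnd_lt (s : List Int) (n : Nat) : ∀ (k : Nat), k < n → pvRunEnd s n k < n := by
  intro k
  induction k using pvRunEnd.induct s n with
  | case1 k h1 ih => intro _; rw [pvRunEnd, dif_pos h1]; exact ih (by omega)
  | case2 k h1 => intro h; rw [pvRunEnd, dif_neg h1]; exact h

theorem pvRunEnd_idem (s : List Int) (n k : Nat) :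
    ∀ t, k ≤ t → t ≤ pvRunEnd s n k → pvRunEnd s n t = pvRunEnd s n k := by
  induction k using pvRunEnd.induct s n with
  | case1 k h1 ih =>
    intro t h2 h3
    have hk : pvRunEnd s n k = pvRunEnd s n (k + 1) := by rw [pvRunEnd, dif_pos h1]
    rw [hk] at h3
    rcases Nat.eq_or_lt_of_le h2 with rfl | h4
    · rfl
    · rw [hk]; exact ih t h4 h3
  | case2 k h1 =>
    intro t h2 h3
    have hk : pvRunEnd s n k = k := by rw [pvRunEnd, dif_neg h1]
    rw [hk] at h3
    have ht : t = k := le_antisymm h3 h2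
    rw [ht]

theorem pvRunEnd_ones (s : List Int) (n k : Nat) :
    ∀ t, k < t → t ≤ pvRunEnd s n k → pvG s (t : Int) = 1 := by
  induction k using pvRunEnd.induct s n with
  | case1 k h1 ih =>
    intro t h2 h3
    have hk : pvRunEnd s n k = pvRunEnd s n (k + 1) := by rw [pvRunEnd, dif_pos h1]
    rw [hk] at h3
    rcases Nat.eq_or_lt_of_le (Nat.succ_le_of_lt h2) with h4 | h4
    · have ht : t = k + 1 := h4.symm
      subst ht
      have := h1.2
      push_cast at this ⊢
      exact this
    · exact ih t h4 h3
  | case2 k h1 =>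
    intro t h2 h3
    have hk : pvRunEnd s n k = k := by rw [pvRunEnd, dif_neg h1]
    omega

theorem pvFillRange_length (row : List Int) (j k : Nat) :
    (pvFillRange row j k).length = row.length := by
  unfold pvFillRange
  generalize (k + 1 - j) = len
  induction len generalizing j row with
  | zero => simp
  | succ m ih => rw [List.range'_succ]; simp [List.foldl_cons, ih]

theorem pvFoldlSet_getElem? (v : Int) (len : Nat) :
    ∀ (j : Nat) (row : List Int) (t : Nat),
      ((List.range' j len).foldl (fun r t => r.set t v) row)[t]? =
        if j ≤ t ∧ t < j + len then (if t < row.length then some v else none) else row[t]? := by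
  induction len with
  | zero => intro j row t; rw [List.range'_zero, List.foldl_nil, if_neg (by omega)]
  | succ m ih =>
    intro j row t
    rw [List.range'_succ, List.foldl_cons, ih]
    rw [List.length_set, List.getElem?_set]
    by_cases h2 : j + 1 ≤ t ∧ t < j + 1 + m
    · rw [if_pos h2, if_pos (show j ≤ t ∧ t < j + (m + 1) by omega)]
    · rw [if_neg h2]
      by_cases hj : j = t
      · subst hj
        rw [if_pos rfl, if_pos (show j ≤ j ∧ j < j + (m + 1) by omega)]
      · rw [if_neg hj, if_neg (show ¬(j ≤ t ∧ t < j + (m + 1)) by omega)]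

theorem pvFillRange_getElem? (row : List Int) (j k : Nat) (hjk : j ≤ k)
    (hk : k < row.length) (t : Nat) :
    (pvFillRange row j k)[t]? = if j ≤ t ∧ t ≤ k then some ((k : Nat) : Int) else row[t]? := by
  unfold pvFillRange
  rw [pvFoldlSet_getElem?]
  by_cases h : j ≤ t ∧ t ≤ k
  · rw [if_pos (show j ≤ t ∧ t < j + (k + 1 - j) by omega),
      if_pos (show t < row.length by omega), if_pos h]
  · rw [if_neg (show ¬(j ≤ t ∧ t < j + (k + 1 - j)) by omega), if_neg h]

theorem pvFillRow_getElem? (s : List Int) (n : Nat) :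
    ∀ (row : List Int) (j : Nat), row.length = n → ∀ (t : Nat),
      (pvFillRow s n row j)[t]? =
        if j ≤ t ∧ t < n ∧ pvG s (t : Int) = 1 then some ((pvRunEnd s n t : Nat) : Int)
        else row[t]? := by
  intro row j
  induction row, j using pvFillRow.induct s n with
  | case1 row j h hg k ih =>
    intro hlen t
    have hstep : pvFillRow s n row j =
        pvFillRow s n (pvFillRange row j (pvRunEnd s n j)) (pvRunEnd s n j + 1) := by
      rw [pvFillRow, dif_pos h, if_pos hg]
    rw [hstep, ih (by rw [pvFillRange_length, hlen]) t,
      pvFillRange_getElem? row j (pvRunEnd s n j) (pvRunEnd_ge s n j)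
        (by rw [hlen]; exact pvRunEnd_lt s n j h) t]
    by_cases h1 : j ≤ t ∧ t ≤ pvRunEnd s n j
    · have hg' : pvG s (t : Int) = 1 := by
        rcases Nat.eq_or_lt_of_le h1.1 with rfl | hlt
        · exact hg
        · exact pvRunEnd_ones s n j t hlt h1.2
      have hlt : pvRunEnd s n j < n := pvRunEnd_lt s n j h
      rw [if_neg (show ¬(pvRunEnd s n j + 1 ≤ t ∧ t < n ∧ pvG s (t : Int) = 1) by
          rintro ⟨ha, _, _⟩; omega),
        if_pos h1,
        if_pos (show j ≤ t ∧ t < n ∧ pvG s (t : Int) = 1 from ⟨h1.1, by omega, hg'⟩),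
        pvRunEnd_idem s n j t h1.1 h1.2]
    · rw [if_neg h1]
      by_cases h2 : pvRunEnd s n j + 1 ≤ t ∧ t < n ∧ pvG s (t : Int) = 1
      · rw [if_pos h2, if_pos (show j ≤ t ∧ t < n ∧ pvG s (t : Int) = 1 from
          ⟨by have := pvRunEnd_ge s n j; omega, h2.2⟩)]
      · have h3 : ¬(j ≤ t ∧ t < n ∧ pvG s (t : Int) = 1) := by
          rintro ⟨ha, hb, hc⟩
          exact h2 ⟨by omega, hb, hc⟩
        rw [if_neg h2, if_neg h3]
  | case2 row j h hg ih =>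
    intro hlen t
    have hstep : pvFillRow s n row j = pvFillRow s n row (j + 1) := by
      rw [pvFillRow, dif_pos h, if_neg hg]
    rw [hstep, ih hlen t]
    by_cases h2 : j + 1 ≤ t ∧ t < n ∧ pvG s (t : Int) = 1
    · rw [if_pos h2, if_pos (show j ≤ t ∧ t < n ∧ pvG s (t : Int) = 1 from ⟨by omega, h2.2⟩)]
    · have h3 : ¬(j ≤ t ∧ t < n ∧ pvG s (t : Int) = 1) := by
        rintro ⟨ha, hb, hc⟩
        rcases Nat.eq_or_lt_of_le ha with rfl | hlt
        · exact hg hc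
        · exact h2 ⟨hlt, hb, hc⟩
      rw [if_neg h2, if_neg h3]
  | case3 row j h =>
    intro hlen t
    rw [pvFillRow, dif_neg h, if_neg (show ¬(j ≤ t ∧ t < n ∧ pvG s (t : Int) = 1) by
      rintro ⟨ha, hb, _⟩; omega)]

theorem pvFillRow_eq_specRow (s : List Int) (n : Nat) :
    pvFillRow s n (List.replicate n (-1)) 0 = pvSpecRow s n := by
  apply List.ext_getElem?
  intro t
  rw [pvFillRow_getElem? s n (List.replicate n (-1)) 0 (by simp) t]
  unfold pvSpecRow
  by_cases ht : t < n
  · rw [List.getElem?_map, List.getElem?_range ht, Option.map_some]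
    by_cases hg : pvG s (t : Int) = 1
    · rw [if_pos ⟨Nat.zero_le t, ht, hg⟩, if_pos hg]
    · rw [if_neg (by rintro ⟨_, _, hc⟩; exact hg hc), if_neg hg,
        List.getElem?_replicate, if_pos ht]
  · rw [if_neg (by rintro ⟨_, hb, _⟩; exact ht hb), List.getElem?_map,
      List.getElem?_replicate, if_neg ht,
      List.getElem?_eq_none (by simp; omega)]
    rfl

-- ---------- A side ----------

-- Nat-indexed version of A's inner-loop step on a single row
def pvStepA (s : List Int) (st : List Int × Int) (j : Nat) : List Int × Int :=
  if pvG s (j : Int) = 1 then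
    let temp := if st.2 = -1 then (j : Int) else st.2
    (st.1.set j temp, temp)
  else (st.1, -1)

-- Int-indexed version (what the port literally folds on a single row)
def pvStepAI (s : List Int) (st : List Int × Int) (j : Int) : List Int × Int :=
  if pvG s j = 1 then
    let temp := if st.2 = -1 then j else st.2
    (st.1.set j.toNat temp, temp)
  else (st.1, -1)

-- the whole inner loop of A for one value of i, as the port writes it
def pvBodyA (samples : List (List Int)) (length : Int) (flag : List (List Int)) (i : Int) :
    List (List Int) :=
  ((PySem.List.pyRange (length - 1) (-1) (-1)).foldl
    (fun (st : List (List Int) × Int) j =>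
      if pvG (pvRow samples i) j = 1 then
        let temp := if st.2 = -1 then j else st.2
        (st.1.set i.toNat ((pvRow st.1 i).set j.toNat temp), temp)
      else (st.1, -1)) (flag, -1)).1

def pvTempAt (s : List Int) (n m : Nat) : Int :=
  if m < n ∧ pvG s (m : Int) = 1 then ((pvRunEnd s n m : Nat) : Int) else -1

def pvPatch (s : List Int) (n : Nat) (row : List Int) (m : Nat) : List Int :=
  row.mapIdx (fun t v => if t < m ∧ pvG s (t : Int) = 1 then ((pvRunEnd s n t : Nat) : Int) else v)

theorem pvRow_eq (flag : List (List Int)) (i : Nat) :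
    pvRow flag (i : Int) = flag[i]?.getD [] := by
  unfold pvRow
  rw [PySem.List.pyGet?_natCast]

theorem pvInnerLift (s : List Int) (js : List Int) :
    ∀ (flag : List (List Int)) (temp : Int) (i : Nat), i < flag.length →
      js.foldl (fun (st : List (List Int) × Int) j =>
          if pvG s j = 1 then
            let tmp := if st.2 = -1 then j else st.2
            (st.1.set (i : Int).toNat ((pvRow st.1 (i : Int)).set j.toNat tmp), tmp)
          else (st.1, -1)) (flag, temp) =
        (flag.set i ((js.foldl (pvStepAI s) (flag[i]?.getD [], temp)).1),
          (js.foldl (pvStepAI s) (flag[i]?.getD [], temp)).2) := by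
  induction js with
  | nil =>
    intro flag temp i h
    simp only [List.foldl_nil]
    rw [List.getElem?_eq_getElem h, Option.getD_some, List.set_getElem_self]
  | cons j js ih =>
    intro flag temp i h
    rw [List.foldl_cons, List.foldl_cons]
    by_cases hg : pvG s j = 1
    · have h1 : (if pvG s j = 1 then
            let tmp := if (flag, temp).2 = -1 then j else (flag, temp).2
            ((flag, temp).1.set ((i : Nat) : Int).toNat
              ((pvRow (flag, temp).1 ((i : Nat) : Int)).set j.toNat tmp), tmp)
          else ((flag, temp).1, -1)) =
          (flag.set i ((flag[i]?.getD []).set j.toNat (if temp = -1 then j else temp)),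
            if temp = -1 then j else temp) := by
        simp only []
        rw [if_pos hg, pvRow_eq flag i, Int.toNat_natCast]
      have h2 : pvStepAI s (flag[i]?.getD [], temp) j =
          ((flag[i]?.getD []).set j.toNat (if temp = -1 then j else temp),
            if temp = -1 then j else temp) := by
        unfold pvStepAI
        rw [if_pos hg]
      rw [h1, h2,
        ih (flag.set i ((flag[i]?.getD []).set j.toNat (if temp = -1 then j else temp)))
          _ i (by rw [List.length_set]; exact h),
        List.getElem?_set_self h, Option.getD_some, List.set_set]
    · have h1 : (if pvG s j = 1 then
            let tmp := if (flag, temp).2 = -1 then j else (flag, temp).2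
            ((flag, temp).1.set ((i : Nat) : Int).toNat
              ((pvRow (flag, temp).1 ((i : Nat) : Int)).set j.toNat tmp), tmp)
          else ((flag, temp).1, -1)) = (flag, -1) := by
        simp only []
        rw [if_neg hg]
      have h2 : pvStepAI s (flag[i]?.getD [], temp) j = (flag[i]?.getD [], -1) := by
        unfold pvStepAI
        rw [if_neg hg]
      rw [h1, h2]
      exact ih flag (-1) i h

theorem pvStepAI_eq_stepA (s : List Int) (st : List Int × Int) (k : Nat) :
    pvStepAI s st (k : Int) = pvStepA s st k := by
  unfold pvStepAI pvStepA
  rw [Int.toNat_natCast]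

theorem pvFoldlAI_eq (s : List Int) (n : Nat) (st : List Int × Int) :
    ((List.range n).map (fun (k : Nat) => (n : Int) - 1 - (k : Int))).foldl (pvStepAI s) st =
      ((List.range n).reverse).foldl (pvStepA s) st := by
  have h1 : (List.range n).reverse = (List.range n).map (fun x => n - 1 - x) := by
    conv_lhs => rw [List.range_eq_range', List.reverse_range']
    simp
  rw [h1, List.foldl_map, List.foldl_map]
  apply PySem.List.foldl_congr_mem
  intro acc k hk
  have hkn : k < n := List.mem_range.1 hk
  have e : (n : Int) - 1 - (k : Int) = ((n - 1 - k : Nat) : Int) := by omega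
  rw [e, pvStepAI_eq_stepA]

theorem pvTempAt_top (s : List Int) (n : Nat) : pvTempAt s n n = -1 := by
  unfold pvTempAt
  rw [if_neg (by rintro ⟨h, _⟩; omega)]

theorem pvPatch_zero (s : List Int) (n : Nat) (row : List Int) :
    pvPatch s n row 0 = row := by
  apply List.ext_getElem (by simp [pvPatch])
  intro t h1 h2
  simp [pvPatch, List.getElem_mapIdx]

theorem pvPatch_set (s : List Int) (n : Nat) (row : List Int) (m : Nat)
    (hg : pvG s (m : Int) = 1) :
    pvPatch s n (row.set m ((pvRunEnd s n m : Nat) : Int)) m = pvPatch s n row (m + 1) := by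
  apply List.ext_getElem (by simp [pvPatch])
  intro t h1 h2
  simp only [pvPatch, List.getElem_mapIdx, List.getElem_set]
  by_cases h3 : t < m ∧ pvG s (t : Int) = 1
  · rw [if_pos h3, if_pos ⟨by omega, h3.2⟩]
  · rw [if_neg h3]
    by_cases h4 : m = t
    · subst h4
      rw [if_pos rfl, if_pos ⟨by omega, hg⟩]
    · rw [if_neg h4, if_neg (by
        rintro ⟨ha, hb⟩
        exact h3 ⟨by omega, hb⟩)]

theorem pvPatch_not1 (s : List Int) (n : Nat) (row : List Int) (m : Nat)
    (hg : ¬ pvG s (m : Int) = 1) :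
    pvPatch s n row m = pvPatch s n row (m + 1) := by
  apply List.ext_getElem (by simp [pvPatch])
  intro t h1 h2
  simp only [pvPatch, List.getElem_mapIdx]
  by_cases h3 : t < m ∧ pvG s (t : Int) = 1
  · rw [if_pos h3, if_pos ⟨by omega, h3.2⟩]
  · rw [if_neg h3, if_neg (by
      rintro ⟨ha, hb⟩
      rcases Nat.eq_or_lt_of_le (Nat.lt_succ_iff.1 ha) with rfl | hlt
      · exact hg hb
      · exact h3 ⟨hlt, hb⟩)]

theorem pvBackward_eq (s : List Int) (n : Nat) :
    ∀ (m : Nat), m ≤ n → ∀ (row : List Int),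
      (List.range m).reverse.foldl (pvStepA s) (row, pvTempAt s n m) =
        (pvPatch s n row m, pvTempAt s n 0) := by
  intro m
  induction m with
  | zero =>
    intro _ row
    simp only [List.range_zero, List.reverse_nil, List.foldl_nil, pvPatch_zero]
  | succ m ih =>
    intro hm row
    rw [List.range_succ, List.reverse_append, List.reverse_cons, List.reverse_nil,
      List.nil_append, List.singleton_append, List.foldl_cons]
    have hmn : m < n := by omega
    by_cases hg : pvG s (m : Int) = 1
    · have htmp : pvStepA s (row, pvTempAt s n (m + 1)) m =
          (row.set m ((pvRunEnd s n m : Nat) : Int), pvTempAt s n m) := by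
        unfold pvStepA
        rw [if_pos hg]
        have hEeq : pvTempAt s n m = ((pvRunEnd s n m : Nat) : Int) := by
          unfold pvTempAt
          rw [if_pos ⟨hmn, hg⟩]
        by_cases hc : m + 1 < n ∧ pvG s ((m : Int) + 1) = 1
        · have h1 : pvTempAt s n (m + 1) = ((pvRunEnd s n (m + 1) : Nat) : Int) := by
            unfold pvTempAt
            rw [if_pos ⟨hc.1, by push_cast; exact hc.2⟩]
          have h2 : pvRunEnd s n m = pvRunEnd s n (m + 1) := by
            rw [pvRunEnd, dif_pos hc]
          rw [h1, hEeq, h2,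
            if_neg (show ¬((pvRunEnd s n (m + 1) : Nat) : Int) = -1 by omega)]
        · have h1 : pvTempAt s n (m + 1) = -1 := by
            unfold pvTempAt
            rw [if_neg (by
              rintro ⟨ha, hb⟩
              exact hc ⟨ha, by push_cast at hb ⊢; exact hb⟩)]
          have h2 : pvRunEnd s n m = m := by
            rw [pvRunEnd, dif_neg hc]
          rw [h1, hEeq, h2, if_pos rfl]
      rw [htmp, ih (by omega) (row.set m ((pvRunEnd s n m : Nat) : Int)), pvPatch_set s n row m hg]
    · have htmp : pvStepA s (row, pvTempAt s n (m + 1)) m = (row, pvTempAt s n m) := by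
        unfold pvStepA
        rw [if_neg hg]
        have h1 : pvTempAt s n m = -1 := by
          unfold pvTempAt
          rw [if_neg (by rintro ⟨_, hb⟩; exact hg hb)]
        rw [h1]
      rw [htmp, ih (by omega) row, pvPatch_not1 s n row m hg]

theorem pvPatch_full (s : List Int) (n : Nat) :
    pvPatch s n (List.replicate n (-1)) n = pvSpecRow s n := by
  apply List.ext_getElem (by simp [pvPatch, pvSpecRow])
  intro t h1 h2
  have ht : t < n := by simpa [pvPatch] using h1
  simp only [pvPatch, pvSpecRow, List.getElem_mapIdx, List.getElem_map, List.getElem_range,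
    List.getElem_replicate]
  by_cases hg : pvG s (t : Int) = 1
  · rw [if_pos ⟨ht, hg⟩, if_pos hg]
  · rw [if_neg (by rintro ⟨_, hb⟩; exact hg hb), if_neg hg]

theorem pvBodyA_lift (samples : List (List Int)) (n : Nat) (flag : List (List Int)) (i : Nat)
    (h : i < flag.length) :
    pvBodyA samples (n : Int) flag (i : Int) =
      flag.set i
        ((((List.range n).reverse).foldl (pvStepA (pvRow samples (i : Int))) (flag[i], -1)).1) := by
  unfold pvBodyA
  have e2 : PySem.List.pyRange ((n : Int) - 1) (-1) (-1) =
      (List.range n).map (fun (k : Nat) => (n : Int) - 1 - (k : Int)) := by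
    have hn : ((n : Int) - 1 - (-1)).toNat = n := by omega
    rw [PySem.List.pyRange_neg_one, hn]
  rw [e2, pvInnerLift (pvRow samples (i : Int)) _ flag (-1) i h, pvFoldlAI_eq,
    List.getElem?_eq_getElem h, Option.getD_some]

theorem pvOuter (samples : List (List Int)) (n : Nat) :
    ∀ (len m : Nat), m + len = n → ∀ (flag : List (List Int)), flag.length = n →
      (∀ t, m ≤ t → t < n → flag[t]? = some (List.replicate n (-1))) →
      ∀ (t : Nat),
        ((List.range' m len).foldl
            (fun (fl : List (List Int)) (k : Nat) => pvBodyA samples (n : Int) fl (k : Int)) flag)[t]? =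
          if m ≤ t ∧ t < n then some (pvSpecRow (pvRow samples (t : Int)) n) else flag[t]? := by
  intro len
  induction len with
  | zero =>
    intro m hmn flag hlen hinv t
    rw [List.range'_zero, List.foldl_nil, if_neg (by omega)]
  | succ len ih =>
    intro m hmn flag hlen hinv t
    rw [List.range'_succ, List.foldl_cons]
    have hm : m < n := by omega
    have hmf : m < flag.length := by omega
    have hrow : flag[m] = List.replicate n (-1) := by
      have := hinv m le_rfl hm
      rw [List.getElem?_eq_getElem hmf] at this
      exact Option.some.inj this
    have hbody : pvBodyA samples (n : Int) flag (m : Int) =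
        flag.set m (pvSpecRow (pvRow samples (m : Int)) n) := by
      rw [pvBodyA_lift samples n flag m hmf, hrow]
      congr 1
      have h0 : (-1 : Int) = pvTempAt (pvRow samples (m : Int)) n n := (pvTempAt_top _ n).symm
      nth_rewrite 2 [h0]
      rw [pvBackward_eq (pvRow samples (m : Int)) n n le_rfl (List.replicate n (-1)),
        pvPatch_full]
    rw [hbody]
    rw [ih (m + 1) (by omega) _ (by rw [List.length_set]; exact hlen)
      (by
        intro u hu1 hu2
        rw [List.getElem?_set_ne (by omega)]
        exact hinv u (by omega) hu2) t]
    by_cases h1 : m + 1 ≤ t ∧ t < n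
    · rw [if_pos h1, if_pos (by omega)]
    · rw [if_neg h1]
      by_cases h2 : t = m
      · subst h2
        rw [if_pos ⟨le_rfl, hm⟩, List.getElem?_set_self (by omega)]
      · rw [if_neg (by omega), List.getElem?_set_ne (by omega)]

theorem make_flag_eq_map (length : Int) (samples : List (List Int)) :
    make_flag length samples =
      (List.range length.toNat).map
        (fun (i : Nat) => pvSpecRow (pvRow samples (i : Int)) length.toNat) := by
  by_cases hneg : length < 0
  · have h0 : PySem.List.pyRange 0 length 1 = [] := PySem.List.pyRange_one_eq_nil (by omega)
    have h1 : length.toNat = 0 := by omega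
    simp [make_flag, h0, h1]
  · obtain ⟨n, rfl⟩ : ∃ n : Nat, length = (n : Int) :=
      ⟨length.toNat, (Int.toNat_of_nonneg (not_lt.1 hneg)).symm⟩
    have hmf : make_flag (n : Int) samples =
        ((List.range n).map (fun (k : Nat) => (k : Int))).foldl
          (fun fl i => pvBodyA samples (n : Int) fl i)
          (List.replicate n (List.replicate n (-1))) := by
      unfold make_flag pvBodyA
      rw [PySem.List.pyRange_zero_natCast]
      simp [Function.comp_def, List.map_const']
    rw [hmf, List.foldl_map, Int.toNat_natCast]
    apply List.ext_getElem?
    intro t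
    have hro := pvOuter samples n n 0 (by omega) (List.replicate n (List.replicate n (-1)))
      (by simp) (by intro u _ hu; rw [List.getElem?_replicate, if_pos hu]) t
    rw [show List.range' 0 n = List.range n from List.range_eq_range'.symm] at hro
    rw [hro]
    by_cases ht : t < n
    · rw [if_pos ⟨Nat.zero_le t, ht⟩, List.getElem?_map, List.getElem?_range ht]
      rfl
    · rw [if_neg (by omega), List.getElem?_replicate, if_neg ht, List.getElem?_map,
        List.getElem?_eq_none (by simp; omega)]
      rfl

theorem make_flag_alt_eq_map (length : Int) (samples : List (List Int)) :
    make_flag_alt length samples =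
      (List.range length.toNat).map
        (fun (i : Nat) => pvSpecRow (pvRow samples (i : Int)) length.toNat) := by
  unfold make_flag_alt
  rw [PySem.List.foldl_append_singleton_eq_map, List.nil_append]
  exact List.map_congr_left (fun i _ => pvFillRow_eq_specRow _ _)

-- ===== VERDICT (by name: the statement is the Claim_ definition above) =====
theorem make_flag_spec : Claim_equal_make_flag := by
  intro length samples _ _
  unfold Spec_make_flag
  rw [make_flag_eq_map, make_flag_alt_eq_map]
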